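-- pv_equiv track=rewrite | github.com/melodist/CodingPractice | src/programmers/StackQueue_Function Development.py | solution
-- ===== SOURCE A (Python) =====
-- from collections import deque
-- import math
--
-- def solution(progresses, speeds):
--     days = 0
--     p = deque(progresses)
--     s = deque(speeds)
--     answer = []
--
--     while p:
--         jobs = 1
--         now_p = p.popleft()
--         now_s = s.popleft()
--         days = math.ceil((100 - now_p) / now_s)
--         while p and p[0] + days * s[0] >= 100:
--             p.popleft()
--             s.popleft()
--             jobs += 1
--         answer.append(jobs)
--
--     return answer
-- ===== SOURCE B (Python) =====
-- import math
--
-- def solution(progresses, speeds):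
--     answer = []
--     lead = None
--     for p, s in zip(progresses, speeds):
--         if lead is not None and p + lead * s >= 100:
--             answer[-1] += 1
--         else:
--             lead = math.ceil((100 - p) / s)
--             answer.append(1)
--     return answer
-- ===== Notes on version B (the rewrite author's own statement) =====
-- stated objective: simpler
-- what changed: Replaces A's deque surgery with nested popping loops by a single flat pass over zip(progresses, speeds) that keeps only the current leader's day count and either increments the last group or opens a new one; same O(n) but less per-element overhead.
import Mathlib
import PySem

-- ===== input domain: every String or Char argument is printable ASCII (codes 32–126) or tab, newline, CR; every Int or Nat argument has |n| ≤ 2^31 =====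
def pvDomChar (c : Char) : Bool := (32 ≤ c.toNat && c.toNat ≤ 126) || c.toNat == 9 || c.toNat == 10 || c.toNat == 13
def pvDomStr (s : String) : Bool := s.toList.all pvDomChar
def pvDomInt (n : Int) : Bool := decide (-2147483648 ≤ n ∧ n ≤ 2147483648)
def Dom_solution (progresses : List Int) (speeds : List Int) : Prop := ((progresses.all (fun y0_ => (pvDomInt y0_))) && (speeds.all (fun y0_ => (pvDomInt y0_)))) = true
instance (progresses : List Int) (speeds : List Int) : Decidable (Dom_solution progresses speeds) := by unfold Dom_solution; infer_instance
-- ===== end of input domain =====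

-- B replaces A's deque surgery with nested popping loops by one flat pass over
-- zip(progresses, speeds) keeping a running leader day count (objective: simpler).

-- ===== PORT A =====
-- math.ceil((100 - p) / s): exact integer ceiling division; on the domain
-- (|numerator|, |denominator| ≤ 2^31 + 100) Python's float quotient is close
-- enough to the exact rational that math.ceil of it equals this integer ceiling.
def pyCeilDiv (a b : Int) : Int := -(PySem.Int.floordiv (-a) b)

-- inner `while p and p[0] + days * s[0] >= 100` loop: returns (extra jobs popped, p', s')
def solutionInner (days : Int) : List Int → List Int → Int × List Int × List Int
  | p0 :: pr, s0 :: sr =>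
      if p0 + days * s0 ≥ 100 then
        let r := solutionInner days pr sr
        (r.1 + 1, r.2)
      else (0, p0 :: pr, s0 :: sr)
  | p, s => (0, p, s)

theorem solutionInner_len (days : Int) (p s : List Int) :
    ((solutionInner days p s).2.1).length ≤ p.length := by
  induction p generalizing s with
  | nil => cases s <;> simp [solutionInner]
  | cons p0 pr ih =>
    cases s with
    | nil => simp [solutionInner]
    | cons s0 sr =>
      simp only [solutionInner]
      split
      · have := ih sr
        simpa using Nat.le_succ_of_le this
      · simp

-- outer `while p` loop of A
def solution (progresses : List Int) (speeds : List Int) : List Int :=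
  match progresses, speeds with
  | [], _ => []
  | _ :: _, [] => []          -- Python raises IndexError here (outside Pre_solution)
  | p0 :: pr, s0 :: sr =>
      let days := pyCeilDiv (100 - p0) s0
      let r := solutionInner days pr sr
      (1 + r.1) :: solution r.2.1 r.2.2
termination_by progresses.length
decreasing_by
  simp only [List.length_cons]
  exact Nat.lt_succ_of_le (solutionInner_len _ _ _)

-- ===== PORT B =====
-- answer[-1] += 1 on a nonempty list
def incrLast : List Int → List Int
  | [] => []
  | [x] => [x + 1]
  | x :: y :: xs => x :: incrLast (y :: xs)

def solutionAltStep (st : List Int × Option Int) (ps : Int × Int) : List Int × Option Int :=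
  match st.2 with
  | some d =>
      if ps.1 + d * ps.2 ≥ 100 then (incrLast st.1, some d)
      else (st.1 ++ [1], some (pyCeilDiv (100 - ps.1) ps.2))
  | none => (st.1 ++ [1], some (pyCeilDiv (100 - ps.1) ps.2))

def solution_alt (progresses : List Int) (speeds : List Int) : List Int :=
  ((progresses.zip speeds).foldl solutionAltStep ([], none)).1

-- ===== PRECONDITION & SPEC =====
-- Pre_ excludes exactly the inputs on which Python A raises: speeds shorter than
-- progresses (IndexError on s[0]/popleft) and jobs whose speed is 0 unless they are
-- a non-first job with progress ≥ 100 (such a job is always absorbed; any other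
-- zero-speed job becomes a group leader and A raises ZeroDivisionError).
def Pre_solution (progresses : List Int) (speeds : List Int) : Prop :=
  progresses.length ≤ speeds.length ∧
    ∀ x ∈ (progresses.zip speeds).zipIdx, x.1.2 ≠ 0 ∨ (1 ≤ x.2 ∧ 100 ≤ x.1.1)
instance (progresses : List Int) (speeds : List Int) : Decidable (Pre_solution progresses speeds) := by
  unfold Pre_solution; infer_instance

def pvWitness_solution : List Int × List Int := ([93, 30, 55], [1, 30, 5])

def Spec_solution (progresses : List Int) (speeds : List Int) (out : List Int) : Prop := out = solution_alt progresses speeds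
instance (progresses : List Int) (speeds : List Int) (out : List Int) : Decidable (Spec_solution progresses speeds out) := by unfold Spec_solution; infer_instance

-- ===== CLAIM (what is proved, stated in full; the proofs are below) =====
def Claim_equal_solution : Prop := ∀ (progresses : List Int) (speeds : List Int), Dom_solution progresses speeds → Pre_solution progresses speeds → Spec_solution progresses speeds (solution progresses speeds)

-- ===== LEMMAS AND PROOFS =====

-- both ports factored through the zipped job list: absorb = A's inner loop on pairs
def absorb (d : Int) : List (Int × Int) → Int × List (Int × Int)
  | [] => (0, [])
  | (p0, s0) :: t =>
      if p0 + d * s0 ≥ 100 then ((absorb d t).1 + 1, (absorb d t).2)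
      else (0, (p0, s0) :: t)

theorem absorb_len (d : Int) (l : List (Int × Int)) : ((absorb d l).2).length ≤ l.length := by
  induction l with
  | nil => simp [absorb]
  | cons x t ih =>
    obtain ⟨p0, s0⟩ := x
    simp only [absorb]
    split
    · simpa using Nat.le_succ_of_le ih
    · simp

-- A's grouping on the zipped list
def aGo : List (Int × Int) → List Int
  | [] => []
  | (p0, s0) :: t =>
      let d := pyCeilDiv (100 - p0) s0
      (1 + (absorb d t).1) :: aGo (absorb d t).2
termination_by l => l.length
decreasing_by
  simp only [List.length_cons]
  exact Nat.lt_succ_of_le (absorb_len _ _)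

theorem solutionInner_bridge (d : Int) (p s : List Int) (h : p.length ≤ s.length) :
    (solutionInner d p s).1 = (absorb d (p.zip s)).1 ∧
    (solutionInner d p s).2.1.zip (solutionInner d p s).2.2 = (absorb d (p.zip s)).2 ∧
    (solutionInner d p s).2.1.length ≤ (solutionInner d p s).2.2.length := by
  induction p generalizing s with
  | nil => cases s <;> simp [solutionInner, absorb]
  | cons p0 pr ih =>
    cases s with
    | nil => simp at h
    | cons s0 sr =>
      simp only [List.length_cons, Nat.add_le_add_iff_right] at h
      obtain ⟨h1, h2, h3⟩ := ih sr h
      simp only [solutionInner, List.zip_cons_cons, absorb]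
      split
      · exact ⟨by simp [h1], by simp [h2], by simpa using h3⟩
      · exact ⟨rfl, rfl, by simpa using h⟩

theorem solution_eq_aGo : ∀ (n : Nat) (p s : List Int), p.length ≤ n → p.length ≤ s.length →
    solution p s = aGo (p.zip s) := by
  intro n
  induction n with
  | zero =>
    intro p s hn _
    have : p = [] := List.eq_nil_of_length_eq_zero (Nat.le_zero.mp hn)
    subst this; simp [solution, aGo]
  | succ n ih =>
    intro p s hn hs
    cases p with
    | nil => simp [solution, aGo]
    | cons p0 pr =>
      cases s with
      | nil => simp at hs
      | cons s0 sr =>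
        simp only [List.length_cons, Nat.add_le_add_iff_right] at hn hs
        obtain ⟨h1, h2, h3⟩ := solutionInner_bridge (pyCeilDiv (100 - p0) s0) pr sr hs
        simp only [solution, List.zip_cons_cons, aGo]
        refine congrArg₂ _ (by rw [h1]) ?_
        rw [ih _ _ (Nat.le_trans (solutionInner_len _ _ _) hn) h3, h2]

theorem incrLast_append (ans : List Int) (k : Int) : incrLast (ans ++ [k]) = ans ++ [k + 1] := by
  induction ans with
  | nil => simp [incrLast]
  | cons x xs ih =>
    cases xs with
    | nil => simp [incrLast]
    | cons y ys => simpa [incrLast] using ih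

theorem foldl_step_eq : ∀ (l : List (Int × Int)) (ans : List Int) (k d : Int),
    (l.foldl solutionAltStep (ans ++ [k], some d)).1 =
      ans ++ (k + (absorb d l).1) :: aGo (absorb d l).2 := by
  intro l
  induction l with
  | nil => intro ans k d; simp [absorb, aGo]
  | cons x t ih =>
    intro ans k d
    obtain ⟨p0, s0⟩ := x
    simp only [List.foldl_cons, solutionAltStep, absorb]
    split
    · rw [incrLast_append, ih]
      have : k + 1 + (absorb d t).1 = k + ((absorb d t).1 + 1) := by ring
      rw [this]
    · rw [ih]
      simp [aGo, List.append_assoc]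

theorem alt_eq_aGo (l : List (Int × Int)) :
    ((l.foldl solutionAltStep ([], none)).1) = aGo l := by
  cases l with
  | nil => simp [aGo]
  | cons x t =>
    obtain ⟨p0, s0⟩ := x
    simp only [List.foldl_cons, solutionAltStep]
    have := foldl_step_eq t [] 1 (pyCeilDiv (100 - p0) s0)
    simpa [aGo] using this

-- ===== VERDICT (by name: the statement is the Claim_ definition above) =====
theorem solution_spec : Claim_equal_solution := by
  intro p s _ pre
  unfold Spec_solution solution_alt
  rw [alt_eq_aGo]
  exact solution_eq_aGo p.length p s (Nat.le_refl _) pre.1
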